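-- pv_equiv track=rewrite | github.com/KoraboinaRajuKumar/langgraph-workspace | app.py | guardrail_check
-- ===== SOURCE A (Python) =====
-- def guardrail_check(message):
--     blocked_words = [
--         "hack",
--         "attack",
--         "illegal",
--         "crack",
--         "fraud"
--     ]
--
--     for word in blocked_words:
--         if word in message.lower():
--             return False
--     return True
-- ===== SOURCE B (Python) =====
-- def guardrail_check(message):
--     m = message.lower()
--     words = ("hack", "attack", "illegal", "crack", "fraud")
--     for i in range(len(m)):
--         if any(m.startswith(w, i) for w in words):
--             return False
--     return True
-- ===== Notes on version B (the rewrite author's own statement) =====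
-- stated objective: alternative
-- what changed: B lowercases once and makes a single left-to-right scan over positions, testing at each position whether any blocked word starts there, instead of A's five separate substring searches over the whole message.
import Mathlib
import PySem

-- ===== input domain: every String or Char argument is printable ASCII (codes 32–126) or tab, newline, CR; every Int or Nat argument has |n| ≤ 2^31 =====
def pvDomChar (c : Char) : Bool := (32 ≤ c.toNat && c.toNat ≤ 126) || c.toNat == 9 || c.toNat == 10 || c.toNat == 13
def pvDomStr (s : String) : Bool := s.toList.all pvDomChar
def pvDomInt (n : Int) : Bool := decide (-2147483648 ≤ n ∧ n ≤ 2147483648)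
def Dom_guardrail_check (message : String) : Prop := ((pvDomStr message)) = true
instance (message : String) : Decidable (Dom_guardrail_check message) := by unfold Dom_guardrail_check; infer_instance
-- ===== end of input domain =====

-- B makes a single position scan over the lowered message instead of A's per-word substring searches; structurally different, same cost.
-- ===== PORT A =====
-- the blocked_words list of A
def pvBlocked : List String := ["hack", "attack", "illegal", "crack", "fraud"]

-- the 'for word in blocked_words' loop with early return False
def pvALoop (message : String) : List String → Bool
  | [] => true
  | w :: ws => if PySem.Str.isIn w (PySem.Str.lower message) then false else pvALoop message ws

def guardrail_check (message : String) : Bool := pvALoop message pvBlocked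

-- ===== PORT B =====
-- B's word tuple, as char lists
def pvWords : List (List Char) := [['h','a','c','k'], ['a','t','t','a','c','k'],
  ['i','l','l','e','g','a','l'], ['c','r','a','c','k'], ['f','r','a','u','d']]

-- B's 'for i in range(len(m))' scan: recursion over the successive suffixes of m;
-- 'm.startswith(w, i)' is startswith on the suffix starting at i
def pvBLoop : List Char → Bool
  | [] => true
  | c :: rest => if pvWords.any (fun w => PySem.Chars.startswith (c :: rest) w) then false
                 else pvBLoop rest

def guardrail_check_alt (message : String) : Bool :=
  pvBLoop (PySem.Chars.lower message.toList)

-- ===== PRECONDITION & SPEC =====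
def Spec_guardrail_check (message : String) (out : Bool) : Prop := out = guardrail_check_alt message
instance (message : String) (out : Bool) : Decidable (Spec_guardrail_check message out) := by unfold Spec_guardrail_check; infer_instance

-- ===== CLAIM (what is proved, stated in full; the proofs are below) =====
def Claim_equal_guardrail_check : Prop := ∀ (message : String), Dom_guardrail_check message → Spec_guardrail_check message (guardrail_check message)

-- ===== LEMMAS AND PROOFS =====

lemma pvBLoop_true_iff (s : List Char) :
    pvBLoop s = true ↔ ∀ w ∈ pvWords, ¬ (w <:+: s) := by
  induction s with
  | nil => simp [pvBLoop]; decide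
  | cons c rest ih =>
      rw [pvBLoop]
      by_cases h : pvWords.any (fun w => PySem.Chars.startswith (c :: rest) w) = true
      · simp only [h, if_true]
        constructor
        · intro hf; exact absurd hf (by simp)
        · intro hall
          rcases List.any_eq_true.mp h with ⟨w, hw, hsw⟩
          exact absurd ((PySem.Chars.startswith_iff _ _).mp hsw).isInfix (hall w hw)
      · rw [if_neg (by simp [h]), ih]
        constructor
        · intro hall w hw hinf
          rcases (List.infix_cons_iff).mp hinf with hpre | hinf'
          · exact h (List.any_eq_true.mpr ⟨w, hw, (PySem.Chars.startswith_iff _ _).mpr hpre⟩)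
          · exact hall w hw hinf'
        · intro hall w hw hinf'
          exact hall w hw (List.infix_cons_iff.mpr (Or.inr hinf'))

lemma pvALoop_true_iff (message : String) (ws : List String) :
    pvALoop message ws = true ↔
      ∀ w ∈ ws, ¬ (w.toList <:+: (PySem.Str.lower message).toList) := by
  induction ws with
  | nil => simp [pvALoop]
  | cons w ws ih =>
      rw [pvALoop]
      by_cases h : PySem.Str.isIn w (PySem.Str.lower message) = true
      · simp only [h, if_true]
        constructor
        · intro hf; exact absurd hf (by simp)
        · intro hall; exact absurd ((PySem.Str.isIn_iff_infix _ _).mp h) (hall w (by simp))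
      · rw [if_neg h, ih]
        constructor
        · intro hall w' hw'
          rcases List.mem_cons.mp hw' with rfl | hw''
          · exact fun hinf => h ((PySem.Str.isIn_iff_infix _ _).mpr hinf)
          · exact hall w' hw''
        · intro hall w' hw'; exact hall w' (List.mem_cons_of_mem _ hw')

-- ===== VERDICT (by name: the statement is the Claim_ definition above) =====
theorem guardrail_check_spec : Claim_equal_guardrail_check := by
  intro message _
  unfold Spec_guardrail_check guardrail_check guardrail_check_alt
  rw [Bool.eq_iff_iff, pvALoop_true_iff, pvBLoop_true_iff]
  rw [show (PySem.Str.lower message).toList = PySem.Chars.lower message.toList from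
    PySem.Str.toList_lower message]
  simp only [pvBlocked, pvWords, List.mem_cons, List.not_mem_nil, or_false]
  constructor
  · rintro hall w (rfl | rfl | rfl | rfl | rfl) <;>
      first
        | exact hall "hack" (by simp)
        | exact hall "attack" (by simp)
        | exact hall "illegal" (by simp)
        | exact hall "crack" (by simp)
        | exact hall "fraud" (by simp)
  · rintro hall w (rfl | rfl | rfl | rfl | rfl) <;>
      simp_all
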